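-- pv_equiv track=rewrite | github.com/fiorefabris/stochastic_phase_models | adler/plotting/dyncode_suorces.py | count_consecutive_pulses
-- ===== SOURCE A (Python) =====
-- from itertools import groupby
--
-- def count_iterable(iterator):
--     return sum(1 for i in iterator)
--
-- def count_consecutive_pulses(box):
--     #te devuelve una lista.- En cada lugar de la lista está el número de unos aislados en cada célula .
--     count_box = []
--     for consecutive in box:
--         count = 0
--         for i, group in groupby(consecutive):
--             if i == 1:
--                 if count_iterable(group) == 1:
--                     count = count + 1
--                 else:
--                     pass
--         count_box.append(count)
--     return(count_box)
-- ===== SOURCE B (Python) =====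
-- def count_consecutive_pulses(box):
--     return [sum(1 for p, x, nx in zip([None] + row, row, row[1:] + [None])
--                 if x == 1 and p != 1 and nx != 1)
--             for row in box]
-- ===== Notes on version B (the rewrite author's own statement) =====
-- stated objective: simpler
-- what changed: Replaced the groupby-and-count-each-run loop by a single local neighbour test: a row element counts iff it equals 1 and neither neighbour does, computed over a zip of the row with its shifted copies.
import Mathlib
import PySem

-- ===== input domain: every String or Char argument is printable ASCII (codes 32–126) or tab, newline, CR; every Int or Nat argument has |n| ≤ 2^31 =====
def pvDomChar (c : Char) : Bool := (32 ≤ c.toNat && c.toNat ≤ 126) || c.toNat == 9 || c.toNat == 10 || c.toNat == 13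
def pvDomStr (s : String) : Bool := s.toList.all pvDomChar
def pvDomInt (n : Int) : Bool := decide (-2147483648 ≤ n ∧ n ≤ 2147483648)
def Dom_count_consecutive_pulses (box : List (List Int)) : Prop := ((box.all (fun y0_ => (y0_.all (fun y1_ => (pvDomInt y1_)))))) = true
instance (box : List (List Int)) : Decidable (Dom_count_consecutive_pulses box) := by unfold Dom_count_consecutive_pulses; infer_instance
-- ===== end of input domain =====

-- B counts, per row, the positions whose value is 1 with no neighbouring 1 (a zip with shifted
-- copies of the row), instead of A's grouping into maximal runs and counting runs of length 1.

-- ===== PORT A =====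
-- itertools.groupby: maximal runs of equal elements, as (key, run) pairs
def pyGroupby : List Int → List (Int × List Int)
  | [] => []
  | x :: xs => (x, x :: xs.takeWhile (· == x)) :: pyGroupby (xs.dropWhile (· == x))
  termination_by l => l.length
  decreasing_by
    simpa using Nat.lt_succ_of_le (xs.length_dropWhile_le _)

-- count_iterable(group) is the run's length
def count_iterable (group : List Int) : Int := group.length

def count_consecutive_pulses (box : List (List Int)) : List Int :=
  box.foldl (fun count_box consecutive =>
    count_box ++
      [ (pyGroupby consecutive).foldl (fun count ig =>
          if ig.1 = 1 then (if count_iterable ig.2 = 1 then count + 1 else count) else count) 0 ])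
    []

-- ===== PORT B =====
-- per-row: zip([None]+row, row, row[1:]+[None]) and count the isolated 1s
def rowIso (row : List Int) : Int :=
  (List.zipWith3 (fun p x nx => if x = 1 ∧ p ≠ some 1 ∧ nx ≠ some 1 then (1 : Int) else 0)
    (none :: row.map some) row (row.tail.map some ++ [none])).sum

def count_consecutive_pulses_alt (box : List (List Int)) : List Int :=
  box.map rowIso

-- ===== PRECONDITION & SPEC =====
def Spec_count_consecutive_pulses (box : List (List Int)) (out : List Int) : Prop := out = count_consecutive_pulses_alt box
instance (box : List (List Int)) (out : List Int) : Decidable (Spec_count_consecutive_pulses box out) := by unfold Spec_count_consecutive_pulses; infer_instance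

-- ===== CLAIM (what is proved, stated in full; the proofs are below) =====
def Claim_equal_count_consecutive_pulses : Prop := ∀ (box : List (List Int)), Dom_count_consecutive_pulses box → Spec_count_consecutive_pulses box (count_consecutive_pulses box)

-- ===== LEMMAS AND PROOFS =====

-- true iff the list is empty or its head is not 1 (lookahead test)
def headOk : List Int → Bool
  | [] => true
  | y :: _ => y != 1

-- canonical recursion: prev-was-1 flag, lookahead at the head of the rest
def gIso : Bool → List Int → Int
  | _, [] => 0
  | b, x :: xs =>
    (if x = 1 ∧ b = false ∧ headOk xs = true then 1 else 0) + gIso (x == 1) xs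

lemma rowIso_aux (l : List Int) (p : Option Int) :
    (List.zipWith3 (fun p x nx => if x = 1 ∧ p ≠ some 1 ∧ nx ≠ some 1 then (1 : Int) else 0)
      (p :: l.map some) l (l.tail.map some ++ [none])).sum = gIso (p == some 1) l := by
  induction l generalizing p with
  | nil => simp [gIso, List.zipWith3]
  | cons x xs ih =>
    cases xs with
    | nil =>
      simp only [List.map_nil, List.tail_cons, List.nil_append, List.zipWith3, List.sum_cons, gIso, headOk]
      by_cases hx : x = 1 <;> by_cases hp : p = some 1 <;>
        simp [hx, hp, List.zipWith3]
    | cons y r =>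
      have h := ih (p := some x)
      simp only [List.tail_cons, List.map_cons, List.cons_append] at h ⊢
      simp only [List.zipWith3, List.sum_cons, h, gIso, headOk]
      by_cases hx : x = 1 <;> by_cases hp : p = some 1 <;> by_cases hy : y = 1 <;>
        simp [hx, hp, hy]

lemma rowIso_eq_gIso (l : List Int) : rowIso l = gIso false l := by
  unfold rowIso
  rw [rowIso_aux l none]
  rfl

-- if the lookahead holds, the prev-flag does not matter
lemma gIso_flag (l : List Int) (h : headOk l = true) (b b' : Bool) :
    gIso b l = gIso b' l := by
  cases l with
  | nil => rfl
  | cons y r =>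
    have hy : ¬ y = 1 := by simpa [headOk] using h
    simp [gIso, hy]

-- a nonempty block of non-1s resets the flag and contributes nothing
lemma gIso_skip_not_one_false (m : List Int) (rest : List Int) (hm : ∀ a ∈ m, a ≠ 1) :
    gIso false (m ++ rest) = gIso false rest := by
  induction m with
  | nil => rfl
  | cons a m ih =>
    have ha : ¬ a = 1 := hm a (by simp)
    have hbeq : (a == (1 : Int)) = false := by simpa using ha
    simp only [List.cons_append, gIso, ha, false_and, if_false, zero_add, hbeq]
    exact ih (fun x hx => hm x (by simp [hx]))

lemma gIso_skip_not_one (a : Int) (m rest : List Int) (ha : a ≠ 1) (hm : ∀ x ∈ m, x ≠ 1)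
    (b : Bool) : gIso b (a :: m ++ rest) = gIso false rest := by
  have hbeq : (a == (1 : Int)) = false := by simpa using ha
  simp only [List.cons_append, gIso, ha, false_and, if_false, zero_add, hbeq]
  exact gIso_skip_not_one_false m rest hm

-- a block of 1s after a 1 contributes nothing and keeps the flag
lemma gIso_skip_ones (m : List Int) (rest : List Int) (hm : ∀ a ∈ m, a = 1) :
    gIso true (m ++ rest) = gIso true rest := by
  induction m with
  | nil => rfl
  | cons a m ih =>
    have ha : a = 1 := hm a (by simp)
    subst ha
    have hbeq : ((1 : Int) == 1) = true := by decide
    simp only [List.cons_append, gIso, Bool.true_eq_false, false_and, and_false, if_false,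
      zero_add, hbeq]
    exact ih (fun x hx => hm x (by simp [hx]))

lemma rowA_eq_gIso : ∀ (n : Nat) (l : List Int), l.length ≤ n → ∀ (c : Int),
    (pyGroupby l).foldl (fun count ig =>
        if ig.1 = 1 then (if count_iterable ig.2 = 1 then count + 1 else count) else count) c
      = c + gIso false l := by
  intro n
  induction n with
  | zero =>
    intro l hl c
    have : l = [] := by
      cases l with
      | nil => rfl
      | cons a t => simp at hl
    subst this
    simp [pyGroupby, gIso]
  | succ n ih =>
    intro l hl c
    cases l with
    | nil => simp [pyGroupby, gIso]
    | cons x xs =>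
      obtain ⟨run, hrun⟩ : ∃ r, xs.takeWhile (· == x) = r := ⟨_, rfl⟩
      obtain ⟨rest, hrest⟩ : ∃ r, xs.dropWhile (· == x) = r := ⟨_, rfl⟩
      have hxs : xs = run ++ rest := by
        rw [← hrun, ← hrest, List.takeWhile_append_dropWhile]
      have hrun_mem : ∀ a ∈ run, a = x := by
        intro a ha; rw [← hrun] at ha; simpa using List.mem_takeWhile_imp ha
      have hrest_head : ∀ y ∈ rest.head?, y ≠ x := by
        intro y hy
        rw [← hrest] at hy
        have := List.head_dropWhile_not (· == x)
          (l := xs) (by intro h; rw [h] at hy; simp at hy)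
        cases hd : xs.dropWhile (· == x) with
        | nil => rw [hd] at hy; simp at hy
        | cons z r =>
          rw [hd] at hy; simp at hy
          subst hy
          simpa [hd] using this
      have hlen : rest.length ≤ n := by
        have h1 := xs.length_dropWhile_le (· == x)
        rw [hrest] at h1
        simp at hl; omega
      rw [pyGroupby]
      simp only [List.foldl_cons, hrun, hrest]
      rw [ih rest hlen]
      by_cases hx : x = 1
      · subst hx
        have hok : headOk rest = true := by
          cases hrd : rest with
          | nil => simp [headOk]
          | cons z r =>
            have : z ≠ 1 := hrest_head z (by simp [hrd])
            simp [headOk]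
            omega
        cases hr : run with
        | nil =>
          -- isolated 1
          rw [hr, List.nil_append] at hxs
          have hcnt : count_iterable [(1 : Int)] = 1 := by simp [count_iterable]
          simp only [hcnt]
          rw [hxs]
          have h1 : gIso false ((1 : Int) :: rest) = 1 + gIso true rest := by
            cases hrd : rest with
            | nil => simp [gIso, headOk]
            | cons z r =>
              have hz : ¬ z = 1 := by
                have := hrest_head z (by simp [hrd]); simpa using this
              simp [gIso, headOk, hz]
          rw [h1, gIso_flag rest hok true false]
          norm_num
          ring
        | cons a run' =>
          -- run of length ≥ 2
          have ha : a = 1 := hrun_mem a (hr ▸ List.mem_cons_self)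
          subst ha
          rw [hr] at hxs
          have hones : ∀ z ∈ ((1 : Int) :: run'), z = 1 := fun z hz => hrun_mem z (hr ▸ hz)
          have hcnt : count_iterable ((1 : Int) :: 1 :: run') ≠ 1 := by
            simp [count_iterable]
            omega
          simp only [if_neg hcnt]
          have h1 : gIso false ((1 : Int) :: xs) = gIso false rest := by
            rw [hxs]
            have e1 : gIso false ((1 : Int) :: ((1 : Int) :: run') ++ rest)
                = gIso true (((1 : Int) :: run') ++ rest) := by
              simp [gIso, headOk]
            rw [← List.cons_append] at *
            rw [e1, gIso_skip_ones _ _ hones, gIso_flag rest hok true false]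
          rw [h1]
          simp
      · -- x ≠ 1: whole block contributes nothing
        simp only [if_neg hx]
        have hne : ∀ z ∈ run, z ≠ 1 := by
          intro z hz; rw [hrun_mem z hz]; exact hx
        have h1 : gIso false (x :: xs) = gIso false rest := by
          rw [hxs, ← List.cons_append]
          exact gIso_skip_not_one x run rest hx hne false
        rw [h1]

lemma foldl_append_map (box : List (List Int)) (acc : List Int) :
    box.foldl (fun count_box consecutive =>
      count_box ++
        [ (pyGroupby consecutive).foldl (fun count ig =>
            if ig.1 = 1 then (if count_iterable ig.2 = 1 then count + 1 else count) else count) 0 ])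
      acc = acc ++ box.map rowIso := by
  induction box generalizing acc with
  | nil => simp
  | cons r rs ih =>
    simp only [List.foldl_cons, List.map_cons, ih]
    rw [rowA_eq_gIso r.length r (le_refl _), ← rowIso_eq_gIso]
    simp

-- ===== VERDICT (by name: the statement is the Claim_ definition above) =====
theorem count_consecutive_pulses_spec : Claim_equal_count_consecutive_pulses := by
  intro box _
  unfold Spec_count_consecutive_pulses count_consecutive_pulses count_consecutive_pulses_alt
  simpa using foldl_append_map box []
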